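-- pv_equiv track=rewrite | github.com/pypi-data/pypi-mirror-404 | packages/vibe-remote/vibe_remote-2.1.15.tar.gz/vibe_remote-2.1.15/modules/agents/opencode/utils.py | _build_reasoning_options_from_variants
-- ===== SOURCE A (Python) =====
-- from typing import Any, Dict, List, Optional
--
-- _REASONING_VARIANT_ORDER = ["none", "minimal", "low", "medium", "high", "xhigh", "max"]
--
-- _REASONING_VARIANT_LABELS = {
--     "none": "None",
--     "minimal": "Minimal",
--     "low": "Low",
--     "medium": "Medium",
--     "high": "High",
--     "xhigh": "Extra High",
--     "max": "Max",
-- }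
--
-- def _build_reasoning_options_from_variants(variants: Dict[str, Any]) -> List[Dict[str, str]]:
--     sorted_variants = sorted(
--         variants.keys(),
--         key=lambda variant: (
--             _REASONING_VARIANT_ORDER.index(variant)
--             if variant in _REASONING_VARIANT_ORDER
--             else len(_REASONING_VARIANT_ORDER),
--             variant,
--         ),
--     )
--     return [
--         {
--             "value": variant_key,
--             "label": _REASONING_VARIANT_LABELS.get(variant_key, variant_key.capitalize()),
--         }
--         for variant_key in sorted_variants
--     ]
-- ===== SOURCE B (Python) =====
-- _REASONING_VARIANT_ORDER = ["none", "minimal", "low", "medium", "high", "xhigh", "max"]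
--
-- _REASONING_VARIANT_LABELS = {
--     "none": "None",
--     "minimal": "Minimal",
--     "low": "Low",
--     "medium": "Medium",
--     "high": "High",
--     "xhigh": "Extra High",
--     "max": "Max",
-- }
--
-- _ORDER_SET = set(_REASONING_VARIANT_ORDER)
--
--
-- def _build_reasoning_options_from_variants(variants):
--     known = [v for v in _REASONING_VARIANT_ORDER if v in variants]
--     unknown = sorted(v for v in variants if v not in _ORDER_SET)
--     return [
--         {"value": k, "label": _REASONING_VARIANT_LABELS.get(k, k.capitalize())}
--         for k in known + unknown
--     ]
-- ===== Notes on version B (the rewrite author's own statement) =====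
-- stated objective: simpler
-- what changed: Replaces the keyed tuple-sort of all keys by two independent passes: known keys are picked off the fixed order list in its order, unknown keys are sorted alphabetically, and the two parts are concatenated.
import Mathlib
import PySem

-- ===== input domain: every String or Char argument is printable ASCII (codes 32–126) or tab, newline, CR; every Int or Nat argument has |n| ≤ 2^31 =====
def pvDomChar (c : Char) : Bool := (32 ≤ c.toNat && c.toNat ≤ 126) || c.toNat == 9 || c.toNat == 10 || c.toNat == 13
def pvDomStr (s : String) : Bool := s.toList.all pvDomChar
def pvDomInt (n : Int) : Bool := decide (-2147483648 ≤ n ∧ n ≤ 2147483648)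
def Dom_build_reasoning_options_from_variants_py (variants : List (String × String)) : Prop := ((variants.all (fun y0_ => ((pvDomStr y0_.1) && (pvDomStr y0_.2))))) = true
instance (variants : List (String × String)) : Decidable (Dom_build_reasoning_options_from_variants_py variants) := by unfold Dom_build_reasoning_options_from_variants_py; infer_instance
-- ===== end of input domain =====

-- B replaces A's keyed tuple-sort of all keys by two passes (known keys in the fixed
-- order, unknown keys sorted alphabetically) concatenated; objective: simpler.

-- shared module constants
def pvOrder : List String := ["none", "minimal", "low", "medium", "high", "xhigh", "max"]

def pvLabels : PySem.Dict String String := PySem.Dict.ofList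
  [("none", "None"), ("minimal", "Minimal"), ("low", "Low"), ("medium", "Medium"),
   ("high", "High"), ("xhigh", "Extra High"), ("max", "Max")]

-- str.capitalize, ported by hand: exact on the ASCII domain (Char.toUpper/toLower are ASCII-exact)
def pvCapitalize (s : String) : String :=
  match s.toList with
  | [] => ""
  | c :: cs => String.ofList (c.toUpper :: cs.map Char.toLower)

-- ===== PORT A =====
-- the tuple sort key (index-or-len, variant); the tuple is ported as a lexicographic pair,
-- which is exactly Python's tuple comparison
def pvKeyA (v : String) : Lex (Nat × String) :=
  toLex (if v ∈ pvOrder then (PySem.List.index? pvOrder v).getD pvOrder.length else pvOrder.length, v)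

def build_reasoning_options_from_variants_py (variants : List (String × String)) : List (List (String × String)) :=
  let sortedVariants := PySem.List.sorted (PySem.List.dedup (variants.map Prod.fst)) pvKeyA false
  sortedVariants.map (fun k => [("value", k), ("label", PySem.Dict.getD pvLabels k (pvCapitalize k))])

-- ===== PORT B =====
def build_reasoning_options_from_variants_py_alt (variants : List (String × String)) : List (List (String × String)) :=
  let keys := PySem.List.dedup (variants.map Prod.fst)
  let known := pvOrder.filter (fun v => keys.contains v)
  let unknown := PySem.List.sorted (keys.filter (fun v => !pvOrder.contains v)) (fun v => v) false
  (known ++ unknown).map (fun k => [("value", k), ("label", PySem.Dict.getD pvLabels k (pvCapitalize k))])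

-- ===== PRECONDITION & SPEC =====
def Spec_build_reasoning_options_from_variants_py (variants : List (String × String)) (out : List (List (String × String))) : Prop := out = build_reasoning_options_from_variants_py_alt variants
instance (variants : List (String × String)) (out : List (List (String × String))) : Decidable (Spec_build_reasoning_options_from_variants_py variants out) := by unfold Spec_build_reasoning_options_from_variants_py; infer_instance

-- ===== CLAIM (what is proved, stated in full; the proofs are below) =====
def Claim_equal_build_reasoning_options_from_variants_py : Prop := ∀ (variants : List (String × String)), Dom_build_reasoning_options_from_variants_py variants → Spec_build_reasoning_options_from_variants_py variants (build_reasoning_options_from_variants_py variants)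

-- ===== LEMMAS AND PROOFS =====

theorem pvKeyA_lt_of_mem_of_not_mem {a b : String} (ha : a ∈ pvOrder) (hb : b ∉ pvOrder) :
    pvKeyA a < pvKeyA b := by
  have h7 : (if a ∈ pvOrder then (PySem.List.index? pvOrder a).getD pvOrder.length else pvOrder.length) < 7 := by
    fin_cases ha <;> decide
  unfold pvKeyA
  rw [Prod.Lex.toLex_lt_toLex]
  left
  simp only [if_neg hb]
  simpa [pvOrder] using h7

theorem pvKeyA_lt_of_not_mem {a b : String} (ha : a ∉ pvOrder) (hb : b ∉ pvOrder)
    (hab : a < b) : pvKeyA a < pvKeyA b := by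
  unfold pvKeyA
  rw [Prod.Lex.toLex_lt_toLex]
  right
  simp [if_neg ha, if_neg hb, hab]

theorem pvOrder_pairwise : pvOrder.Pairwise (fun a b => pvKeyA a < pvKeyA b) := by
  decide

theorem pv_main (keys : List String) (hnd : keys.Nodup) :
    PySem.List.sorted keys pvKeyA false =
      pvOrder.filter (fun v => keys.contains v) ++
        PySem.List.sorted (keys.filter (fun v => !pvOrder.contains v)) (fun v => v) false := by
  set known := pvOrder.filter (fun v => keys.contains v) with hk
  set unknown := PySem.List.sorted (keys.filter (fun v => !pvOrder.contains v)) (fun v => v) false with hu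
  have hundNodup : unknown.Nodup := ((PySem.List.sorted_perm _ _ _).nodup_iff).mpr (hnd.filter _)
  have hunMem : ∀ {x : String}, x ∈ unknown → x ∈ keys ∧ x ∉ pvOrder := by
    intro x hx
    have := (PySem.List.mem_sorted _ _ _ _).mp hx
    simpa using List.mem_filter.mp this
  have hknMem : ∀ {x : String}, x ∈ known → x ∈ pvOrder ∧ x ∈ keys := by
    intro x hx
    have := List.mem_filter.mp hx
    simpa using this
  apply PySem.List.sorted_eq_of_perm_of_pairwise_lt
  · -- (known ++ unknown).Perm keys
    have h1 : known.Perm (keys.filter (fun v => pvOrder.contains v)) := by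
      rw [List.perm_ext_iff_of_nodup (by exact (List.Pairwise.filter _ (by decide : pvOrder.Nodup))) (hnd.filter _)]
      intro a
      simp [known, List.mem_filter, and_comm]
    have h2 : unknown.Perm (keys.filter (fun v => !pvOrder.contains v)) :=
      PySem.List.sorted_perm _ _ _
    exact (h1.append h2).trans (List.filter_append_perm _ keys)
  · -- Pairwise strict key order on known ++ unknown
    rw [List.pairwise_append]
    refine ⟨?_, ?_, ?_⟩
    · exact List.Pairwise.filter _ pvOrder_pairwise
    · have hle := PySem.List.sorted_pairwise (keys.filter (fun v => !pvOrder.contains v)) (fun v : String => v)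
      rw [← hu] at hle
      have hne : unknown.Pairwise (fun a b => a ≠ b) := hundNodup
      have := hle.and hne
      refine this.imp_of_mem ?_
      intro a b ha hb hab
      exact pvKeyA_lt_of_not_mem (hunMem ha).2 (hunMem hb).2 (lt_of_le_of_ne hab.1 hab.2)
    · intro a ha b hb
      exact pvKeyA_lt_of_mem_of_not_mem (hknMem ha).1 (hunMem hb).2

-- ===== VERDICT (by name: the statement is the Claim_ definition above) =====
theorem build_reasoning_options_from_variants_py_spec : Claim_equal_build_reasoning_options_from_variants_py := by
  intro variants _
  unfold Spec_build_reasoning_options_from_variants_py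
  unfold build_reasoning_options_from_variants_py build_reasoning_options_from_variants_py_alt
  rw [pv_main _ (PySem.List.nodup_dedup _)]
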